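-- pv_equiv track=rewrite | github.com/saipavan4518/SentiAnalysis | SentiAnalysis.py | removestuff
-- ===== SOURCE A (Python) =====
-- def removestuff(text):
--     wordtokens = text.split()
--     stuff = "[]_-+=><;:|!./?,~`*\\$#@^&{}()\'\""
--     num = "0123456789"
--
--     l = ' '.join([''.join([c for c in word if c not in stuff]) for word in wordtokens])
--
--
--     wordtokens = l.split()
--
--     l = []
--     for word in wordtokens:
--         newword = ""
--         for w in word:
--             if w in num:
--                 break
--             else:
--                 newword += w
--
--         if newword != "":
--             l.append(newword)
--
--     return ' '.join(l)
-- ===== SOURCE B (Python) =====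
-- def removestuff(text):
--     stuff = "[]_-+=><;:|!./?,~`*\\$#@^&{}()\'\""
--     out = []
--     cur = ""
--     skip = False
--     for ch in text:
--         if ch.isspace():
--             if cur:
--                 out.append(cur)
--             cur = ""
--             skip = False
--         elif skip:
--             pass
--         elif ch in "0123456789":
--             skip = True
--         elif ch not in stuff:
--             cur += ch
--     if cur:
--         out.append(cur)
--     return ' '.join(out)
-- ===== Notes on version B (the rewrite author's own statement) =====
-- stated objective: alternative
-- what changed: B replaces A's three staged passes (split, punctuation-strip comprehension joined and re-split, per-word digit-truncation loop with list accumulator) by a single streaming state machine over the raw characters that never calls split(): it carries a current-word buffer and a skip-until-whitespace flag set at the first digit.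
import Mathlib
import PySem

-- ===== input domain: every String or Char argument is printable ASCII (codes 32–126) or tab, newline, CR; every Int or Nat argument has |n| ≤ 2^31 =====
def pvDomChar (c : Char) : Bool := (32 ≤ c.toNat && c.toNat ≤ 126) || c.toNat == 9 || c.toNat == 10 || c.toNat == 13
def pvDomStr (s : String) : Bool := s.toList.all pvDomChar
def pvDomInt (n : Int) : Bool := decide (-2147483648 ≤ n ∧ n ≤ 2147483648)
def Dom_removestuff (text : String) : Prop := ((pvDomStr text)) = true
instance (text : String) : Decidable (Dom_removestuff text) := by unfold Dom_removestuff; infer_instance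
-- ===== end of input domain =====

-- B replaces A's staged passes (split, strip-punctuation + join + re-split, truncate-at-digit) by one
-- streaming state machine over the raw characters (current-word buffer + skip-until-whitespace flag); objective: alternative.

-- ===== PORT A =====
def pvStuff : List Char := "[]_-+=><;:|!./?,~`*\\$#@^&{}()'\"".toList
def pvNum : List Char := "0123456789".toList

-- A's inner loop: 'for w in word: if w in num: break; else: newword += w'
def pvTruncA : List Char → List Char
  | [] => []
  | c :: cs => if pvNum.contains c then [] else c :: pvTruncA cs

def removestuff (text : String) : String :=
  let wordtokens := PySem.Chars.split₀ text.toList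
  let l := PySem.Chars.join [' '] (wordtokens.map (fun word => word.filter (fun c => !pvStuff.contains c)))
  let wordtokens2 := PySem.Chars.split₀ l
  let l2 := wordtokens2.foldl (fun acc word =>
      let newword := pvTruncA word
      if newword ≠ [] then acc ++ [newword] else acc) []
  String.ofList (PySem.Chars.join [' '] l2)

-- ===== PORT B =====
-- Source B's state machine: state = (current cleaned word `cur`, `skip` flag set at the first digit);
-- whitespace flushes `cur` (if non-empty) and clears the flag; other chars are handled in Source B's branch order.
def pvScan : List Char → List Char → Bool → List (List Char) → List (List Char)
  | [], cur, _, out => if cur ≠ [] then out ++ [cur] else out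
  | c :: cs, cur, skip, out =>
    if PySem.Chars.isspace c then
      pvScan cs [] false (if cur ≠ [] then out ++ [cur] else out)
    else if skip then
      pvScan cs cur skip out
    else if pvNum.contains c then
      pvScan cs cur true out
    else if !pvStuff.contains c then
      pvScan cs (cur ++ [c]) skip out
    else
      pvScan cs cur skip out

def removestuff_alt (text : String) : String :=
  String.ofList (PySem.Chars.join [' '] (pvScan text.toList [] false []))

-- ===== PRECONDITION & SPEC =====
def Spec_removestuff (text : String) (out : String) : Prop := out = removestuff_alt text
instance (text : String) (out : String) : Decidable (Spec_removestuff text out) := by unfold Spec_removestuff; infer_instance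

-- ===== CLAIM (what is proved, stated in full; the proofs are below) =====
def Claim_equal_removestuff : Prop := ∀ (text : String), Dom_removestuff text → Spec_removestuff text (removestuff text)

-- ===== LEMMAS AND PROOFS =====

-- proof-only characterisation of what one word contributes: skip punctuation, stop at the first digit
def pvClean : List Char → List Char
  | [] => []
  | c :: cs =>
    if pvNum.contains c then []
    else if pvStuff.contains c then pvClean cs
    else c :: pvClean cs

lemma pvClean_append (w v : List Char) :
    pvClean (w ++ v)
      = if w.any (fun c => pvNum.contains c) then pvClean w else pvClean w ++ pvClean v := by
  induction w with
  | nil => simp [pvClean]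
  | cons c t ih =>
      by_cases hn : c ∈ pvNum
      · simp [pvClean, hn]
      · by_cases hd : ∃ x ∈ t, x ∈ pvNum <;>
          by_cases hs : c ∈ pvStuff <;>
            simp [pvClean, hn, hs, hd, ih]

lemma go_acc (s : List Char) : ∀ (cur : List Char) (acc : List (List Char)),
    PySem.Chars.split₀.go s cur acc = acc.reverse ++ PySem.Chars.split₀.go s cur [] := by
  induction s with
  | nil =>
      intro cur acc
      simp only [PySem.Chars.split₀.go]
      by_cases h : cur.isEmpty <;> simp [h]
  | cons c t ih =>
      intro cur acc
      by_cases hc : PySem.Chars.isspace c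
      · simp only [PySem.Chars.split₀.go, hc, if_true]
        by_cases h : cur.isEmpty
        · simp only [h, if_true]
          exact ih [] acc
        · simp only [h, Bool.false_eq_true, if_false]
          rw [ih [] (cur.reverse :: acc), ih [] [cur.reverse]]
          simp
      · simp only [PySem.Chars.split₀.go, hc, Bool.false_eq_true, if_false]
        exact ih (c :: cur) acc

-- the state-machine invariant: after consuming the (reversed) raw prefix rraw of the current word,
-- B's state is (pvClean of that prefix, whether it contained a digit), and the machine finishes split₀.go's work
lemma pvScan_go (s : List Char) : ∀ (rraw : List Char) (out : List (List Char)),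
    pvScan s (pvClean rraw.reverse) (rraw.reverse.any (fun c => pvNum.contains c)) out
      = out ++ ((PySem.Chars.split₀.go s rraw []).map pvClean).filter (· ≠ []) := by
  induction s with
  | nil =>
      intro rraw out
      simp only [pvScan, PySem.Chars.split₀.go]
      by_cases h : rraw.isEmpty
      · have hr : rraw = [] := by simpa [List.isEmpty_iff] using h
        subst hr
        simp [pvClean]
      · simp only [h, Bool.false_eq_true, if_false, List.reverse_cons, List.reverse_nil,
          List.nil_append, List.map_cons, List.map_nil, List.filter]
        by_cases hne : pvClean rraw.reverse = [] <;> simp [hne]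
  | cons c t ih =>
      intro rraw out
      by_cases hc : PySem.Chars.isspace c
      · simp only [pvScan, hc, if_true, PySem.Chars.split₀.go]
        by_cases h : rraw.isEmpty
        · have hr : rraw = [] := by simpa [List.isEmpty_iff] using h
          subst hr
          have := ih [] out
          simpa [pvClean] using this
        · have hcl := ih [] ((if pvClean rraw.reverse ≠ [] then out ++ [pvClean rraw.reverse] else out))
          simp only [List.reverse_nil, List.any_nil, pvClean] at hcl
          rw [hcl]
          simp only [h, Bool.false_eq_true, if_false]
          rw [go_acc t [] [rraw.reverse]]
          simp only [List.reverse_cons, List.reverse_nil, List.nil_append,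
            List.map_cons, List.singleton_append]
          by_cases hne : pvClean rraw.reverse = [] <;> simp [hne, List.filter]
      · -- c is not whitespace: one step of the machine = one step of split₀.go on the extended word
        have hrw : (c :: rraw).reverse = rraw.reverse ++ [c] := by simp
        have key := ih (c :: rraw) out
        rw [hrw, pvClean_append] at key
        by_cases hd : ∃ x ∈ rraw, x ∈ pvNum
        · have hdb : (rraw.reverse.any fun c => pvNum.contains c) = true := by simpa using hd
          rw [List.any_append, hdb] at key
          simp only [Bool.true_or] at key
          simp only [pvScan, hc, Bool.false_eq_true, if_false]
          rw [hdb]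
          simp only [PySem.Chars.split₀.go, hc, Bool.false_eq_true, if_false]
          exact key
        · by_cases hn : c ∈ pvNum
          · -- first digit of the word: set skip, cur unchanged
            simp [pvScan, hc, hd, hn, pvClean] at key ⊢
            simpa [PySem.Chars.split₀.go, hc] using key
          · by_cases hs : c ∈ pvStuff
            · -- punctuation: dropped
              simp [pvScan, hc, hd, hn, hs, pvClean] at key ⊢
              simpa [PySem.Chars.split₀.go, hc] using key
            · -- ordinary char: appended to cur
              simp [pvScan, hc, hd, hn, hs, pvClean] at key ⊢
              simpa [PySem.Chars.split₀.go, hc] using key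

lemma pvScan_eq (s : List Char) :
    pvScan s [] false [] = ((PySem.Chars.split₀ s).map pvClean).filter (· ≠ []) := by
  have := pvScan_go s [] []
  simpa [pvClean, PySem.Chars.split₀] using this

-- ===== A-side lemmas (reduce A's join/re-split pipeline) =====

lemma go_cons_space (s : List Char) (cur : List Char) (acc : List (List Char)) :
    PySem.Chars.split₀.go (' ' :: s) cur acc
      = PySem.Chars.split₀.go s [] (if cur.isEmpty then acc else cur.reverse :: acc) := by
  have hsp : PySem.Chars.isspace ' ' = true := by decide
  simp only [PySem.Chars.split₀.go, hsp, if_true]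
  by_cases h : cur.isEmpty <;> simp [h]

lemma go_append_word (w : List Char) (hw : ∀ c ∈ w, PySem.Chars.isspace c = false)
    (s cur : List Char) (acc : List (List Char)) :
    PySem.Chars.split₀.go (w ++ s) cur acc = PySem.Chars.split₀.go s (w.reverse ++ cur) acc := by
  induction w generalizing cur with
  | nil => simp
  | cons c t ih =>
      have hc : PySem.Chars.isspace c = false := hw c (by simp)
      simp only [List.cons_append, PySem.Chars.split₀.go, hc, Bool.false_eq_true, if_false]
      rw [ih (fun d hd => hw d (by simp [hd]))]
      simp

lemma go_mem_nonspace (s cur : List Char) (acc : List (List Char))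
    (hcur : ∀ c ∈ cur, PySem.Chars.isspace c = false)
    (hacc : ∀ w ∈ acc, ∀ c ∈ w, PySem.Chars.isspace c = false) :
    ∀ w ∈ PySem.Chars.split₀.go s cur acc, ∀ c ∈ w, PySem.Chars.isspace c = false := by
  induction s generalizing cur acc with
  | nil =>
      intro w hw
      simp only [PySem.Chars.split₀.go] at hw
      split at hw
      · exact hacc w (by simpa using hw)
      · simp only [List.mem_reverse, List.mem_cons] at hw
        rcases hw with rfl | hw
        · intro c hc; exact hcur c (by simpa using hc)
        · exact hacc w hw
  | cons c t ih =>
      intro w hw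
      by_cases hc : PySem.Chars.isspace c = true
      · simp only [PySem.Chars.split₀.go, hc, if_true] at hw
        split at hw
        · exact ih [] acc (by simp) hacc w hw
        · refine ih [] (cur.reverse :: acc) (by simp) ?_ w hw
          intro v hv
          rcases List.mem_cons.mp hv with rfl | hv
          · intro d hd; exact hcur d (by simpa using hd)
          · exact hacc v hv
      · simp only [PySem.Chars.split₀.go, hc] at hw
        refine ih (c :: cur) acc ?_ hacc w hw
        intro d hd
        rcases List.mem_cons.mp hd with rfl | hd
        · simpa using hc
        · exact hcur d hd

lemma go_join_space (ys : List (List Char)) (acc : List (List Char))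
    (h : ∀ y ∈ ys, ∀ c ∈ y, PySem.Chars.isspace c = false) :
    PySem.Chars.split₀.go (PySem.Chars.join [' '] ys) [] acc
      = acc.reverse ++ ys.filter (· ≠ []) := by
  induction ys generalizing acc with
  | nil => simp [PySem.Chars.join_nil, PySem.Chars.split₀.go]
  | cons y t ih =>
      cases t with
      | nil =>
          rw [PySem.Chars.join_singleton]
          have := go_append_word y (h y (by simp)) [] [] acc
          simp only [List.append_nil] at this
          rw [this]
          simp only [PySem.Chars.split₀.go]
          by_cases hy : y = [] <;> simp [hy]
      | cons z zs =>
          rw [PySem.Chars.join_cons_cons]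
          rw [List.append_assoc]
          rw [go_append_word y (h y (by simp)) _ [] acc]
          simp only [List.append_nil, List.singleton_append]
          rw [go_cons_space]
          rw [ih _ (fun v hv => h v (by simp [hv]))]
          by_cases hy : y = [] <;> simp [hy]

-- split(' '.join(ys)) keeps exactly the non-empty ys, when no y contains whitespace
lemma split₀_join_space (ys : List (List Char))
    (h : ∀ y ∈ ys, ∀ c ∈ y, PySem.Chars.isspace c = false) :
    PySem.Chars.split₀ (PySem.Chars.join [' '] ys) = ys.filter (· ≠ []) := by
  have := go_join_space ys [] h
  simpa [PySem.Chars.split₀] using this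

-- every word produced by split₀ contains no whitespace
lemma split₀_mem_nonspace (s : List Char) :
    ∀ w ∈ PySem.Chars.split₀ s, ∀ c ∈ w, PySem.Chars.isspace c = false :=
  go_mem_nonspace s [] [] (by simp) (by simp)

lemma pvNum_not_stuff (c : Char) (h : pvNum.contains c = true) : pvStuff.contains c = false := by
  simp [pvNum] at h
  rcases h with rfl|rfl|rfl|rfl|rfl|rfl|rfl|rfl|rfl|rfl <;> decide

-- stripping punctuation then truncating at the first digit = the one-pass scan
lemma pvClean_eq_truncA_filter (cs : List Char) :
    pvClean cs = pvTruncA (cs.filter (fun c => !pvStuff.contains c)) := by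
  induction cs with
  | nil => rfl
  | cons c t ih =>
      by_cases hn : c ∈ pvNum
      · have hs := pvNum_not_stuff c (by simpa using hn)
        simp only [Bool.eq_false_iff, ne_eq, List.contains_eq_mem, decide_eq_true_eq] at hs
        simp [pvClean, pvTruncA, hn, hs]
      · by_cases hs : c ∈ pvStuff
        · simp [pvClean, hn, hs, ih]
        · simp [pvClean, pvTruncA, hn, hs, ih]

-- ===== VERDICT (by name: the statement is the Claim_ definition above) =====
theorem removestuff_spec : Claim_equal_removestuff := by
  intro text _
  unfold Spec_removestuff removestuff removestuff_alt
  simp only []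
  rw [pvScan_eq]
  rw [split₀_join_space _ (by
    intro y hy c hc
    simp only [List.mem_map] at hy
    obtain ⟨w, hw, rfl⟩ := hy
    exact split₀_mem_nonspace _ w hw c (List.mem_of_mem_filter hc))]
  rw [PySem.List.foldl_append_ite (p := fun w => pvTruncA w ≠ []) (f := pvTruncA)]
  simp only [List.nil_append]
  congr 1
  rw [List.filter_filter, List.filter_map, List.map_map, List.filter_map]
  have h1 : ((fun a => decide (pvTruncA a ≠ []) && decide (a ≠ [])) ∘ fun word => List.filter (fun c => !pvStuff.contains c) word)
      = ((fun w => decide (w ≠ [])) ∘ pvClean) := by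
    funext w
    simp only [Function.comp_apply, ← pvClean_eq_truncA_filter]
    by_cases h : pvClean w = []
    · simp [h]
    · have hF : List.filter (fun c => !pvStuff.contains c) w ≠ [] := by
        intro hnil
        apply h
        rw [pvClean_eq_truncA_filter, hnil]
        rfl
      simp only [ne_eq, h, hF, not_false_eq_true, decide_true, Bool.and_self]
  have h2 : (pvTruncA ∘ fun word => List.filter (fun c => !pvStuff.contains c) word) = pvClean := by
    funext w
    exact (pvClean_eq_truncA_filter w).symm
  rw [h1, h2]
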